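-- pv_equiv track=rewrite | github.com/overwatchcorp/CSCI121 | hw/poly2max.py | poly2max
-- ===== SOURCE A (Python) =====
-- def poly2max(xmin, xmax, ymin, ymax):
--     largestZ = None
--     for x in range(xmin, xmax + 1):
--         for y in range(ymin, ymax + 1):
--             equationVal = -x**4 + 3*x**2 - y**4 + 5*y**2
--             if largestZ== None:
--                 largestZ = equationVal
--             if equationVal > largestZ:
--                 largestZ = equationVal
--     return largestZ
-- ===== SOURCE B (Python) =====
-- def poly2max(xmin, xmax, ymin, ymax):
--     if xmin > xmax or ymin > ymax:
--         return None
--     gx = max(-x**4 + 3*x**2 for x in range(xmin, xmax + 1))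
--     hy = max(-y**4 + 5*y**2 for y in range(ymin, ymax + 1))
--     return gx + hy
-- ===== Notes on version B (the rewrite author's own statement) =====
-- stated objective: alternative
-- what changed: B replaces A's nested scan over the whole (x,y) grid by two independent one-dimensional maximizations, exploiting that the quartic is separable: max of g(x)+h(y) over the grid equals max g(x) + max h(y); empty ranges are guarded and return None like A.
import Mathlib
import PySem

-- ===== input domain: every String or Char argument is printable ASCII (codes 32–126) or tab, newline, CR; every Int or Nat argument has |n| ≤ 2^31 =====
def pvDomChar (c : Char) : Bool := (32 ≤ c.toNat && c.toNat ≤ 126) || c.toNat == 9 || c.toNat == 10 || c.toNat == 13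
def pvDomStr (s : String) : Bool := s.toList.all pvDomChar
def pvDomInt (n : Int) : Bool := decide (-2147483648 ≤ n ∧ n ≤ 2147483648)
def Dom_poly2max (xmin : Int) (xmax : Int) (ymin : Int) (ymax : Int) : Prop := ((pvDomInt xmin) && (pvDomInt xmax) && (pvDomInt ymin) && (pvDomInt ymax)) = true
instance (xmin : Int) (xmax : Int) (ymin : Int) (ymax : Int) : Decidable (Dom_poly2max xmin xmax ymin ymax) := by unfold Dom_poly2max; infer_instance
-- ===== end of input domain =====

-- B exploits separability: the grid maximum of (-x^4+3x^2) + (-y^4+5y^2) equals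
-- (max over x alone) + (max over y alone), so B does two one-dimensional scans instead of A's nested grid scan.

-- ===== PORT A =====
def poly2max (xmin : Int) (xmax : Int) (ymin : Int) (ymax : Int) : Option Int :=
  (PySem.List.pyRange xmin (xmax + 1) 1).foldl (fun largestZ x =>
    (PySem.List.pyRange ymin (ymax + 1) 1).foldl (fun largestZ y =>
      let equationVal := -x^4 + 3*x^2 - y^4 + 5*y^2
      let largestZ := if largestZ = none then some equationVal else largestZ
      -- 'equationVal > largestZ': largestZ is always 'some _' here (first if just set it)
      match largestZ with
      | some m => if equationVal > m then some equationVal else some m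
      | none => none) largestZ) none

-- ===== PORT B =====
def pvG (x : Int) : Int := -x^4 + 3*x^2
def pvH (y : Int) : Int := -y^4 + 5*y^2

def poly2max_alt (xmin : Int) (xmax : Int) (ymin : Int) (ymax : Int) : Option Int :=
  if xmin > xmax ∨ ymin > ymax then none
  else
    match PySem.List.max? ((PySem.List.pyRange xmin (xmax + 1) 1).map pvG) (fun v => v),
          PySem.List.max? ((PySem.List.pyRange ymin (ymax + 1) 1).map pvH) (fun v => v) with
    | some gx, some hy => some (gx + hy)
    | _, _ => none  -- unreachable: both ranges are nonempty past the guard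

-- ===== PRECONDITION & SPEC =====
def Spec_poly2max (xmin : Int) (xmax : Int) (ymin : Int) (ymax : Int) (out : Option Int) : Prop := out = poly2max_alt xmin xmax ymin ymax
instance (xmin : Int) (xmax : Int) (ymin : Int) (ymax : Int) (out : Option Int) : Decidable (Spec_poly2max xmin xmax ymin ymax out) := by unfold Spec_poly2max; infer_instance

-- ===== CLAIM (what is proved, stated in full; the proofs are below) =====
def Claim_equal_poly2max : Prop := ∀ (xmin : Int) (xmax : Int) (ymin : Int) (ymax : Int), Dom_poly2max xmin xmax ymin ymax → Spec_poly2max xmin xmax ymin ymax (poly2max xmin xmax ymin ymax)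

-- ===== LEMMAS AND PROOFS =====

-- A's loop body, abstracted over the current value
def pvStep (s : Option Int) (v : Int) : Option Int :=
  match s with
  | none => some v
  | some m => if v > m then some v else some m

theorem pvStep_some (b v : Int) : pvStep (some b) v = some (max b v) := by
  simp only [pvStep]
  split_ifs with h <;> congr 1 <;> omega

theorem foldl_pvStep_some (l : List Int) (b : Int) :
    l.foldl pvStep (some b) = some (l.foldl max b) := by
  induction l generalizing b with
  | nil => rfl
  | cons v t ih => simp only [List.foldl_cons, pvStep_some, ih]

theorem foldl_foldl_flatMap (F : Int → List Int) (X : List Int) (s : Option Int) :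
    X.foldl (fun s x => (F x).foldl pvStep s) s = (X.flatMap F).foldl pvStep s := by
  induction X generalizing s with
  | nil => rfl
  | cons x xs ih => simp only [List.foldl_cons, List.flatMap_cons, List.foldl_append, ih]

theorem poly2max_spec : Claim_equal_poly2max := by
  intro xmin xmax ymin ymax _
  unfold Spec_poly2max poly2max poly2max_alt
  by_cases hx : xmin > xmax
  · rw [PySem.List.pyRange_one_eq_nil (by omega : xmax + 1 ≤ xmin)]
    simp [hx]
  by_cases hy : ymin > ymax
  · rw [PySem.List.pyRange_one_eq_nil (by omega : ymax + 1 ≤ ymin)]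
    have : ∀ (X : List Int) (s : Option Int), X.foldl (fun s (_ : Int) => s) s = s := by
      intro X; induction X with
      | nil => intro s; rfl
      | cons x xs ih => intro s; simp only [List.foldl_cons]; exact ih s
    simp only [List.foldl_nil] at this ⊢
    simp [hy, this]
  -- both ranges nonempty
  rw [if_neg (by omega)]
  have hXc := PySem.List.pyRange_one_cons (show xmin < xmax + 1 by omega)
  have hYc := PySem.List.pyRange_one_cons (show ymin < ymax + 1 by omega)
  set Xt := PySem.List.pyRange (xmin + 1) (xmax + 1) 1 with hXt
  set Yt := PySem.List.pyRange (ymin + 1) (ymax + 1) 1 with hYt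
  -- B's two axis maxima
  set Mx := (Xt.map pvG).foldl max (pvG xmin) with hMx
  set My := (Yt.map pvH).foldl max (pvH ymin) with hMy
  rw [hXc, hYc]
  simp only [List.map_cons, PySem.List.max?_id_cons]
  -- rewrite A's nested loop as one fold of pvStep over the flattened grid
  have hinner : ∀ (x : Int) (s : Option Int),
      (ymin :: Yt).foldl (fun largestZ y =>
        let equationVal := -x^4 + 3*x^2 - y^4 + 5*y^2
        let largestZ := if largestZ = none then some equationVal else largestZ
        match largestZ with
        | some m => if equationVal > m then some equationVal else some m
        | none => none) s
      = ((ymin :: Yt).map (fun y => pvG x + pvH y)).foldl pvStep s := by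
    intro x s
    rw [List.foldl_map]
    congr 1
    funext s y
    have hval : -x^4 + 3*x^2 - y^4 + 5*y^2 = pvG x + pvH y := by unfold pvG pvH; ring
    simp only [hval]
    cases s with
    | none => simp [pvStep]
    | some m => simp [pvStep]
  rw [List.foldl_ext _ (fun s x => ((ymin :: Yt).map (fun y => pvG x + pvH y)).foldl pvStep s)
      none (fun s x _ => hinner x s)]
  rw [foldl_foldl_flatMap (fun x => (ymin :: Yt).map (fun y => pvG x + pvH y))]
  set F : Int → List Int := fun x => (ymin :: Yt).map (fun y => pvG x + pvH y) with hF
  have hgrid : (xmin :: Xt).flatMap F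
      = (pvG xmin + pvH ymin) :: (Yt.map (fun y => pvG xmin + pvH y) ++ Xt.flatMap F) := by
    simp [hF]
  rw [hgrid, List.foldl_cons]
  show (Yt.map (fun y => pvG xmin + pvH y) ++ Xt.flatMap F).foldl pvStep
      (pvStep none (pvG xmin + pvH ymin)) = some (Mx + My)
  rw [show pvStep none (pvG xmin + pvH ymin) = some (pvG xmin + pvH ymin) from rfl]
  rw [foldl_pvStep_some]
  set T := Yt.map (fun y => pvG xmin + pvH y) ++ Xt.flatMap F with hT
  set Mz := T.foldl max (pvG xmin + pvH ymin) with hMz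
  -- membership characterization of the grid
  have hmem_grid : ∀ v, v ∈ (pvG xmin + pvH ymin) :: T ↔
      ∃ x, (x = xmin ∨ x ∈ Xt) ∧ ∃ y, (y = ymin ∨ y ∈ Yt) ∧ v = pvG x + pvH y := by
    intro v
    constructor
    · intro hv
      rcases List.mem_cons.mp hv with h | h
      · exact ⟨xmin, Or.inl rfl, ymin, Or.inl rfl, h⟩
      · rcases List.mem_append.mp h with h | h
        · rcases List.mem_map.mp h with ⟨y, hyY, rfl⟩
          exact ⟨xmin, Or.inl rfl, y, Or.inr hyY, rfl⟩
        · rcases List.mem_flatMap.mp h with ⟨x, hxX, hvfx⟩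
          rcases List.mem_map.mp hvfx with ⟨y, hyY, rfl⟩
          rcases List.mem_cons.mp hyY with h' | h'
          · exact ⟨x, Or.inr hxX, y, Or.inl h', rfl⟩
          · exact ⟨x, Or.inr hxX, y, Or.inr h', rfl⟩
    · rintro ⟨x, hxX, y, hyY, rfl⟩
      rcases hxX with rfl | hxX
      · rcases hyY with rfl | hyY
        · exact List.mem_cons_self
        · exact List.mem_cons.mpr (Or.inr (List.mem_append.mpr (Or.inl
            (List.mem_map.mpr ⟨y, hyY, rfl⟩))))
      · refine List.mem_cons.mpr (Or.inr (List.mem_append.mpr (Or.inr ?_)))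
        exact List.mem_flatMap.mpr ⟨x, hxX, List.mem_map.mpr
          ⟨y, List.mem_cons.mpr (by tauto), rfl⟩⟩
  -- Mx is the max of pvG over the x-range, My of pvH over the y-range
  have hMx_ub : ∀ x, (x = xmin ∨ x ∈ Xt) → pvG x ≤ Mx := by
    rintro x (rfl | hx)
    · exact (PySem.List.le_foldl_max (Xt.map pvG) (pvG x)).1
    · exact (PySem.List.le_foldl_max (Xt.map pvG) (pvG xmin)).2 _ (List.mem_map.mpr ⟨x, hx, rfl⟩)
  have hMy_ub : ∀ y, (y = ymin ∨ y ∈ Yt) → pvH y ≤ My := by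
    rintro y (rfl | hy)
    · exact (PySem.List.le_foldl_max (Yt.map pvH) (pvH y)).1
    · exact (PySem.List.le_foldl_max (Yt.map pvH) (pvH ymin)).2 _ (List.mem_map.mpr ⟨y, hy, rfl⟩)
  have hMx_mem : ∃ x, (x = xmin ∨ x ∈ Xt) ∧ Mx = pvG x := by
    rcases PySem.List.foldl_max_mem (Xt.map pvG) (pvG xmin) with h | h
    · exact ⟨xmin, Or.inl rfl, h⟩
    · rcases List.mem_map.mp h with ⟨x, hx, hx'⟩
      exact ⟨x, Or.inr hx, hx'.symm⟩
  have hMy_mem : ∃ y, (y = ymin ∨ y ∈ Yt) ∧ My = pvH y := by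
    rcases PySem.List.foldl_max_mem (Yt.map pvH) (pvH ymin) with h | h
    · exact ⟨ymin, Or.inl rfl, h⟩
    · rcases List.mem_map.mp h with ⟨y, hy, hy'⟩
      exact ⟨y, Or.inr hy, hy'.symm⟩
  -- Mz is the max of the grid
  have hMz_ub : ∀ v ∈ (pvG xmin + pvH ymin) :: T, v ≤ Mz := by
    intro v hv
    rcases List.mem_cons.mp hv with rfl | hv
    · exact (PySem.List.le_foldl_max T _).1
    · exact (PySem.List.le_foldl_max T _).2 _ hv
  have hMz_mem : Mz ∈ (pvG xmin + pvH ymin) :: T := by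
    rcases PySem.List.foldl_max_mem T (pvG xmin + pvH ymin) with h | h
    · exact List.mem_cons.mpr (Or.inl h)
    · exact List.mem_cons.mpr (Or.inr h)
  -- the two maxima coincide
  have hle1 : Mz ≤ Mx + My := by
    rcases (hmem_grid Mz).mp hMz_mem with ⟨x, hx, y, hy, hMzxy⟩
    rw [hMzxy]
    exact add_le_add (hMx_ub x hx) (hMy_ub y hy)
  have hle2 : Mx + My ≤ Mz := by
    rcases hMx_mem with ⟨x, hx, hMxx⟩
    rcases hMy_mem with ⟨y, hy, hMyy⟩
    rw [hMxx, hMyy]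
    exact hMz_ub _ ((hmem_grid _).mpr ⟨x, hx, y, hy, rfl⟩)
  exact congrArg some (le_antisymm hle1 hle2)
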